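-- pv_equiv track=rewrite | github.com/ar1936/leetcode | 1934-evaluate-the-bracket-pairs-of-a-string/evaluate-the-bracket-pairs-of-a-string.py | evaluate
-- ===== SOURCE A (Python) =====
-- from typing import List
--
-- def evaluate(s: str, k: List[List[str]]) -> str:
--     # Create a dictionary for quick look-up of key-value pairs
--     replacements = {key: value for key, value in k}
--
--     result = []
--     n = len(s)
--     i = 0
--
--     while i < n:
--         if s[i] == '(':
--             j = i
--             while i < n and s[i] != ')':
--                 i += 1
--             key = s[j+1:i]
--             result.append(replacements.get(key, '?'))
--         else:
--             result.append(s[i])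
--         i += 1
--
--     return ''.join(result)
-- ===== SOURCE B (Python) =====
-- def evaluate(s, k):
--     # Partition-driven rewrite: no per-character index state machine; each step
--     # slices off the literal prefix and one bracket token with str.partition.
--     replacements = dict(map(tuple, k))
--     out = []
--     rest = s
--     while True:
--         a, sep, after = rest.partition('(')
--         out.append(a)
--         if not sep:
--             return ''.join(out)
--         key, _, rest = after.partition(')')
--         out.append(replacements.get(key, '?'))
-- ===== Notes on version B (the rewrite author's own statement) =====
-- stated objective: idiomatic
-- what changed: Replaced A's per-character index/while state machine with a partition-driven loop: each iteration str.partition slices off the literal prefix and one bracket token, appending whole slices instead of single characters.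
import Mathlib
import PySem

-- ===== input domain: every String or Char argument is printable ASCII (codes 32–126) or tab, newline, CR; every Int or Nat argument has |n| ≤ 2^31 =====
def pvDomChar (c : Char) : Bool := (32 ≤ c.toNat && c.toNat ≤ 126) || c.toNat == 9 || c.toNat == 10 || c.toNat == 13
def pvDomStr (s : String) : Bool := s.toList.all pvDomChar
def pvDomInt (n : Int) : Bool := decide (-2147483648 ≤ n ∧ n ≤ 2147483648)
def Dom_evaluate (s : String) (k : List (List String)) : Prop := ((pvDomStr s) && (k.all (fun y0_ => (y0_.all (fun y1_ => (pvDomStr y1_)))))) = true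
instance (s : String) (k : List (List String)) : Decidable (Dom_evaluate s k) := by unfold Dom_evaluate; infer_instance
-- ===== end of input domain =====

-- B replaces A's per-character index/while state machine by a partition-driven loop
-- (str.partition slices off the literal prefix and one bracket token per step); objective: idiomatic.
-- Both Pythons build the same dict from k (A: comprehension, B: dict(...)); shared helper:
def pvBuildDict (k : List (List String)) : PySem.Dict String String :=
  k.foldl (fun d p =>
    match p with
    | [key, value] => d.insert key value
    | _ => d) PySem.Dict.empty

-- ===== PORT A =====
-- A's outer while over index i, on the char list. The inner `while i < n and s[i] != ')'`
-- starts at i = j where s[j] = '(' ≠ ')', so it is exactly a scan of the tail for ')'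
-- (takeWhile/dropWhile); key = s[j+1:i]; the trailing i += 1 skips the ')' when present.
def pvGoA (d : PySem.Dict String String) : List Char → List (List Char)
  | [] => []
  | c :: rest =>
    if c = '(' then
      let key := rest.takeWhile (· ≠ ')')
      let rest' := (rest.dropWhile (· ≠ ')')).drop 1
      (d.getD (String.mk key) "?").toList :: pvGoA d rest'
    else [c] :: pvGoA d rest
termination_by l => l.length
decreasing_by
  · have h1 := List.length_dropWhile_le (fun x => decide (x ≠ ')')) rest
    simp only [List.length_cons, List.length_drop]
    omega
  · simp

def evaluate (s : String) (k : List (List String)) : String :=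
  String.mk (PySem.Chars.join [] (pvGoA (pvBuildDict k) s.toList))

-- ===== PORT B =====
-- B's `while True` loop: state = (remaining string `rest`, accumulated pieces `out`).
-- t.partition('(') is exact as (takeWhile (· ≠ '('), head of dropWhile, tail of dropWhile)
-- since the separator is a single character; likewise for ')'.
def pvGoB (d : PySem.Dict String String) (t : List Char) (out : List (List Char)) : List (List Char) :=
  let a := t.takeWhile (· ≠ '(')
  match hr : t.dropWhile (· ≠ '(') with
  | [] => out ++ [a]
  | _ :: after =>
    let key := after.takeWhile (· ≠ ')')
    let rest := (after.dropWhile (· ≠ ')')).drop 1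
    pvGoB d rest (out ++ [a, (d.getD (String.mk key) "?").toList])
termination_by t.length
decreasing_by
  have h1 := List.length_dropWhile_le (fun x => decide (x ≠ '(')) t
  rw [hr] at h1
  have h2 := List.length_dropWhile_le (fun x => decide (x ≠ ')')) after
  simp only [List.length_cons] at h1
  simp only [List.length_drop]
  omega

def evaluate_alt (s : String) (k : List (List String)) : String :=
  String.mk (PySem.Chars.join [] (pvGoB (pvBuildDict k) s.toList []))

-- ===== PRECONDITION & SPEC =====
-- Pre_: every pair-list has exactly two elements; otherwise the dict construction in
-- BOTH Pythons raises ValueError (unpacking / dict(...) of a non-pair).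
def Pre_evaluate (s : String) (k : List (List String)) : Prop := ∀ l ∈ k, l.length = 2
instance (s : String) (k : List (List String)) : Decidable (Pre_evaluate s k) := by unfold Pre_evaluate; infer_instance
def pvWitness_evaluate : String × List (List String) := ("x(a)y(b", [["a", "1"], ["b", "2"]])

def Spec_evaluate (s : String) (k : List (List String)) (out : String) : Prop := out = evaluate_alt s k
instance (s : String) (k : List (List String)) (out : String) : Decidable (Spec_evaluate s k out) := by unfold Spec_evaluate; infer_instance

-- ===== CLAIM (what is proved, stated in full; the proofs are below) =====
def Claim_equal_evaluate : Prop := ∀ (s : String) (k : List (List String)), Dom_evaluate s k → Pre_evaluate s k → Spec_evaluate s k (evaluate s k)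

-- ===== LEMMAS AND PROOFS =====

-- join with the empty separator is flatten
theorem pvJoinNil (ls : List (List Char)) : PySem.Chars.join [] ls = ls.flatten := by
  induction ls with
  | nil => simp [PySem.Chars.join_nil]
  | cons x xs ih =>
    cases xs with
    | nil => simp [PySem.Chars.join_singleton]
    | cons y ys => rw [PySem.Chars.join_cons_cons]; simp_all

theorem pvFlattenSingletons (a : List Char) : (a.map fun c => [c]).flatten = a := by
  induction a with
  | nil => rfl
  | cons c cs ih => simp [ih]

-- the head of a nonempty dropWhile fails the predicate
theorem pvDropWhileHead (p : Char → Bool) (t : List Char) (x : Char) (xs : List Char)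
    (h : List.dropWhile p t = x :: xs) : p x = false := by
  induction t with
  | nil => simp at h
  | cons c cs ih =>
    rw [List.dropWhile_cons] at h
    by_cases hc : p c
    · simp [hc] at h; exact ih h
    · simp [hc] at h; obtain ⟨h1, _⟩ := h; subst h1; simpa using hc

-- accumulator lemma for B's loop
theorem pvGoB_acc (d : PySem.Dict String String) (t : List Char) (out : List (List Char)) :
    pvGoB d t out = out ++ pvGoB d t [] := by
  induction hn : t.length using Nat.strong_induction_on generalizing t out with
  | _ n ih =>
  subst hn
  rw [pvGoB.eq_def, pvGoB.eq_def d t []]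
  simp only
  split
  · simp
  · rename_i x after hr
    have hlen : after.length < t.length := by
      have h1 := List.length_dropWhile_le (fun x => decide (x ≠ '(')) t
      rw [hr] at h1; simp only [List.length_cons] at h1; omega
    have hlen' : ((after.dropWhile (fun x => decide (x ≠ ')'))).drop 1).length < t.length := by
      have h2 := List.length_dropWhile_le (fun x => decide (x ≠ ')')) after
      simp only [List.length_drop]; omega
    rw [ih _ hlen' _ _ rfl, ih _ hlen' _ ([] ++ _) rfl]
    simp

-- A flushes a '('-free prefix literally, one singleton piece per character
theorem pvGoA_flush (d : PySem.Dict String String) (a r : List Char) (h : ∀ c ∈ a, c ≠ '(') :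
    pvGoA d (a ++ r) = (a.map fun c => [c]) ++ pvGoA d r := by
  induction a with
  | nil => simp
  | cons c cs ih =>
    have hc : c ≠ '(' := h c (List.mem_cons_self ..)
    rw [List.cons_append, pvGoA.eq_def]
    simp only [if_neg hc]
    rw [ih (fun x hx => h x (List.mem_cons_of_mem _ hx))]
    simp

-- main invariant: the two piece lists flatten to the same characters
theorem pvMain (d : PySem.Dict String String) (t : List Char) :
    (pvGoA d t).flatten = (pvGoB d t []).flatten := by
  induction hn : t.length using Nat.strong_induction_on generalizing t with
  | _ n ih =>
  subst hn
  have ht : t.takeWhile (fun x => decide (x ≠ '(')) ++ t.dropWhile (fun x => decide (x ≠ '(')) = t :=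
    List.takeWhile_append_dropWhile
  have ha : ∀ c ∈ t.takeWhile (fun x => decide (x ≠ '(')), c ≠ '(' := by
    intro c hc
    have := List.mem_takeWhile_imp hc
    simpa using this
  rw [pvGoB.eq_def]
  simp only
  split
  · rename_i hr
    rw [hr, List.append_nil] at ht
    conv_lhs => rw [← ht]
    rw [show t.takeWhile (fun x => decide (x ≠ '(')) = t.takeWhile (fun x => decide (x ≠ '(')) ++ [] by simp] at ha ⊢
    rw [pvGoA_flush d _ [] (by simpa using ha)]
    have h0 : pvGoA d [] = [] := by rw [pvGoA.eq_def]
    simp [h0, pvFlattenSingletons]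
  · rename_i x after hr
    have hx : x = '(' := by
      have := pvDropWhileHead _ _ _ _ hr
      simpa using this
    subst hx
    have hlen : after.length < t.length := by
      have h1 := List.length_dropWhile_le (fun x => decide (x ≠ '(')) t
      rw [hr] at h1; simp only [List.length_cons] at h1; omega
    have hlen' : ((after.dropWhile (fun x => decide (x ≠ ')'))).drop 1).length < t.length := by
      have h2 := List.length_dropWhile_le (fun x => decide (x ≠ ')')) after
      simp only [List.length_drop]; omega
    conv_lhs => rw [← ht, hr, pvGoA_flush d _ _ ha]
    rw [pvGoA.eq_def]
    rw [pvGoB_acc]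
    simp [pvFlattenSingletons]
    exact ih _ (by simpa using hlen') _ rfl

-- ===== VERDICT (by name: the statement is the Claim_ definition above) =====
theorem evaluate_spec : Claim_equal_evaluate := by
  intro s k _ _
  unfold Spec_evaluate evaluate evaluate_alt
  rw [pvJoinNil, pvJoinNil, pvMain]
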